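-- pv_equiv track=rewrite | github.com/lottepy/leetcode | codility/3-garden.py | solution
-- ===== SOURCE A (Python) =====
-- def solution(A):
--     # write your code in Python 3.6
--     if check_aesthetical(A):
--         return 0
--     else:
--         count = 0
--         for i in range(len(A)):
--             tmp = A.copy()
--             del tmp[i]
--             if check_aesthetical(tmp):
--                 count += 1
--         if count > 0:
--             return count
--         else:
--             return -1
--
-- def check_aesthetical(l):
--     tmp = all(cmp(a, b)*cmp(b, c) == -1 for a, b, c in zip(l, l[1:], l[2:]))
--     return tmp
--
-- def cmp(a,b):
--     return (a>b) - (a<b)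
-- ===== SOURCE B (Python) =====
-- def solution(A):
--     k = first_break(A)
--     if k is None:
--         return 0
--     count = 0
--     for i in (k, k + 1, k + 2):
--         if alternating(A[:i] + A[i+1:]):
--             count += 1
--     return count if count > 0 else -1
--
-- def first_break(A):
--     for k in range(len(A) - 2):
--         if not zigzag_at(A, k):
--             return k
--     return None
--
-- def alternating(l):
--     for k in range(len(l) - 2):
--         if not zigzag_at(l, k):
--             return False
--     return True
--
-- def zigzag_at(l, k):
--     s1 = (l[k] > l[k+1]) - (l[k] < l[k+1])
--     s2 = (l[k+1] > l[k+2]) - (l[k+1] < l[k+2])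
--     return s1 * s2 == -1
-- ===== Notes on version B (the rewrite author's own statement) =====
-- stated objective: faster
-- what changed: Instead of trying all n deletions and rescanning the whole list for each (O(n^2)), B finds the first broken triple in one pass and checks only the three deletion positions that could destroy it, since deleting any other index leaves that broken triple intact.
import Mathlib
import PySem

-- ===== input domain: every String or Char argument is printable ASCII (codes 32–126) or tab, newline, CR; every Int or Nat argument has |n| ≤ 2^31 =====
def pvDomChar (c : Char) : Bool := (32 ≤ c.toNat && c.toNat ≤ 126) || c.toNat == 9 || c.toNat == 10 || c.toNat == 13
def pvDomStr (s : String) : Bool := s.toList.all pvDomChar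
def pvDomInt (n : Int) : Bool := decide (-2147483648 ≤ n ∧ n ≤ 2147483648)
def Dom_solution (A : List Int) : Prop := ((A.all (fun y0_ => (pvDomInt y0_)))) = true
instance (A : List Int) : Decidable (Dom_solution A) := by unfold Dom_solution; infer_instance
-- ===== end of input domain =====

-- B replaces A's O(n^2) try-every-deletion loop by finding the first broken triple and
-- testing only the three deletion positions that can destroy it (faster, asymptotic O(n) vs O(n^2)).

-- ===== PORT A =====
def pyCmp (a b : Int) : Int :=
  (if a > b then (1 : Int) else 0) - (if a < b then (1 : Int) else 0)

def check_aesthetical (l : List Int) : Bool :=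
  (l.zip ((l.drop 1).zip (l.drop 2))).all
    (fun t => pyCmp t.1 t.2.1 * pyCmp t.2.1 t.2.2 == -1)

def solution (A : List Int) : Int :=
  if check_aesthetical A then 0
  else
    let count := (List.range A.length).foldl
      (fun c i => if check_aesthetical (A.eraseIdx i) then c + 1 else c) (0 : Int)
    if count > 0 then count else -1

-- ===== PORT B =====
def zigzagAt (l : List Int) (k : Nat) : Bool :=
  let s1 := (if l.getD k 0 > l.getD (k+1) 0 then (1 : Int) else 0)
          - (if l.getD k 0 < l.getD (k+1) 0 then (1 : Int) else 0)
  let s2 := (if l.getD (k+1) 0 > l.getD (k+2) 0 then (1 : Int) else 0)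
          - (if l.getD (k+1) 0 < l.getD (k+2) 0 then (1 : Int) else 0)
  s1 * s2 == -1

def firstBreak (A : List Int) : Option Nat :=
  (List.range (A.length - 2)).find? (fun k => !zigzagAt A k)

def alternating (l : List Int) : Bool :=
  (List.range (l.length - 2)).all (fun k => zigzagAt l k)

def solution_alt (A : List Int) : Int :=
  match firstBreak A with
  | none => 0
  | some k =>
    let count := [k, k+1, k+2].foldl
      (fun c i => if alternating (A.take i ++ A.drop (i+1)) then c + 1 else c) (0 : Int)
    if count > 0 then count else -1

-- ===== PRECONDITION & SPEC =====
def Spec_solution (A : List Int) (out : Int) : Prop := out = solution_alt A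
instance (A : List Int) (out : Int) : Decidable (Spec_solution A out) := by unfold Spec_solution; infer_instance

-- ===== CLAIM (what is proved, stated in full; the proofs are below) =====
def Claim_equal_solution : Prop := ∀ (A : List Int), Dom_solution A → Spec_solution A (solution A)

-- ===== LEMMAS AND PROOFS =====

-- the zipped triple list of A's check is the range-indexed triple list
theorem zip_triples_eq (l : List Int) :
    l.zip ((l.drop 1).zip (l.drop 2)) =
      (List.range (l.length - 2)).map
        (fun k => (l.getD k 0, (l.getD (k+1) 0, l.getD (k+2) 0))) := by
  apply List.ext_getElem
  · simp; omega
  · intro i h1 h2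
    have hi : i < l.length - 2 := by simp at h1; omega
    simp [List.getElem_zip, List.getElem_drop, List.getD_eq_getElem?_getD,
      List.getElem?_eq_getElem (by omega : i < l.length),
      List.getElem?_eq_getElem (by omega : i + 1 < l.length),
      List.getElem?_eq_getElem (by omega : i + 2 < l.length)]
    congr 1
    omega

-- A's check equals B's scan
theorem check_eq_alternating (l : List Int) :
    check_aesthetical l = alternating l := by
  unfold check_aesthetical alternating
  rw [zip_triples_eq, List.all_map]
  rfl

-- counting fold = countP
theorem foldl_count (p : Nat → Bool) (l : List Nat) (c : Int) :
    l.foldl (fun c i => if p i then c + 1 else c) c = c + (l.countP p : Int) := by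
  induction l generalizing c with
  | nil => simp
  | cons a t ih =>
    by_cases h : p a = true
    · simp [h, ih]; ring
    · simp [h, ih]

-- a broken triple at k survives deleting any index outside {k, k+1, k+2}
theorem survive (A : List Int) (k i : Nat) (hk : k + 2 < A.length)
    (hz : zigzagAt A k = false) (hi : i < A.length) (hout : i < k ∨ k + 2 < i) :
    alternating (A.eraseIdx i) = false := by
  unfold alternating
  rw [List.all_eq_false]
  have hlen : (A.eraseIdx i).length = A.length - 1 := List.length_eraseIdx_of_lt hi
  rcases hout with hlt | hgt
  · refine ⟨k - 1, ?_, ?_⟩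
    · rw [List.mem_range, hlen]; omega
    · have heq : zigzagAt (A.eraseIdx i) (k - 1) = zigzagAt A k := by
        unfold zigzagAt
        simp only [List.getD_eq_getElem?_getD, List.getElem?_eraseIdx]
        have h1 : ¬ (k - 1 < i) := by omega
        have h2 : ¬ (k - 1 + 1 < i) := by omega
        have h3 : ¬ (k - 1 + 2 < i) := by omega
        rw [if_neg h1, if_neg h2, if_neg h3]
        simp only [show k - 1 + 1 = k by omega, show k - 1 + 2 = k + 1 by omega,
          show k + 1 + 1 = k + 2 by omega]
      rw [heq, hz]; simp
  · refine ⟨k, ?_, ?_⟩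
    · rw [List.mem_range, hlen]; omega
    · have heq : zigzagAt (A.eraseIdx i) k = zigzagAt A k := by
        unfold zigzagAt
        simp only [List.getD_eq_getElem?_getD, List.getElem?_eraseIdx]
        rw [if_pos (by omega : k < i), if_pos (by omega : k + 1 < i),
            if_pos (by omega : k + 2 < i)]
      rw [heq, hz]; simp

-- ===== VERDICT =====
theorem solution_spec : Claim_equal_solution := by
  intro A _
  show solution A = solution_alt A
  unfold solution solution_alt
  cases hfb : firstBreak A with
  | none =>
    have hall : check_aesthetical A = true := by
      rw [check_eq_alternating]
      unfold alternating
      rw [List.all_eq_true]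
      intro k hk
      have := (List.find?_eq_none.mp hfb) k hk
      simpa using this
    simp [hall]
  | some k =>
    have hz : zigzagAt A k = false := by
      have := List.find?_some hfb; simpa using this
    have hkmem : k ∈ List.range (A.length - 2) := List.mem_of_find?_eq_some hfb
    have hk : k + 2 < A.length := by
      have := List.mem_range.mp hkmem; omega
    have hne : check_aesthetical A = false := by
      rw [check_eq_alternating]
      unfold alternating
      rw [List.all_eq_false]
      exact ⟨k, hkmem, by simp [hz]⟩
    rw [hne]
    simp only [Bool.false_eq_true, if_false]
    -- both counting folds are countP over the same predicate
    set p : Nat → Bool := fun i => check_aesthetical (A.eraseIdx i) with hp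
    have hA : (List.range A.length).foldl
        (fun c i => if check_aesthetical (A.eraseIdx i) then c + 1 else c) (0 : Int)
        = ((List.range A.length).countP p : Int) := by
      rw [foldl_count p]; ring
    have hB : ([k, k+1, k+2].foldl
        (fun c i => if alternating (A.take i ++ A.drop (i+1)) then c + 1 else c) (0 : Int))
        = (([k, k+1, k+2].countP p) : Int) := by
      have hpred : ∀ i : Nat, (alternating (A.take i ++ A.drop (i+1))) = p i := by
        intro i
        show alternating (A.take i ++ A.drop (i+1)) = check_aesthetical (A.eraseIdx i)
        rw [check_eq_alternating, List.eraseIdx_eq_take_drop_succ]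
      simp only [hpred]
      rw [foldl_count p]; ring
    have hcnt : (List.range A.length).countP p = [k, k+1, k+2].countP p := by
      have hsplit : A.length = k + (3 + (A.length - k - 3)) := by omega
      rw [hsplit, List.range_add, List.range_add, List.map_append, List.countP_append,
        List.countP_append, List.map_map]
      have c1 : (List.range k).countP p = 0 := by
        rw [List.countP_eq_zero]
        intro i hi
        have hik : i < k := List.mem_range.mp hi
        simp only [hp, Bool.not_eq_true]
        rw [check_eq_alternating]
        exact survive A k i hk hz (by omega) (Or.inl hik)
      have c2 : List.map (fun x => k + x) (List.range 3) = [k, k + 1, k + 2] := by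
        simp [List.range_succ]
      have c3 : (List.map ((fun x => k + x) ∘ fun x => 3 + x)
          (List.range (A.length - k - 3))).countP p = 0 := by
        rw [List.countP_eq_zero]
        intro a ha
        obtain ⟨x, hx, rfl⟩ := List.mem_map.mp ha
        have hxm : x < A.length - k - 3 := List.mem_range.mp hx
        simp only [hp, Bool.not_eq_true, Function.comp]
        rw [check_eq_alternating]
        exact survive A k (k + (3 + x)) hk hz (by omega) (Or.inr (by omega))
      rw [c1, c2, c3]
      omega
    rw [hA, hB, hcnt]
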